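-- pv_equiv track=rewrite | github.com/dmitry957/codewars-training | kata/6-kyu/n-centered-array/solution.py | is_centered
-- ===== SOURCE A (Python) =====
-- def is_centered(xs: list[int], n: int) -> bool:
--     length = len(xs)
--     if length == 0:
--         return n == 0
--
--     mid = length // 2
--     center_sum = xs[mid] if length % 2 else 0
--     left, right = mid - 1, mid + (1 if length % 2 else 0)
--
--     while left >= 0 and right < length:
--         if center_sum == n and left + 1 == length - right:
--             return True
--         center_sum += xs[left] + xs[right]
--         left -= 1
--         right += 1
--
--     return center_sum == n and left + 1 == length - right
-- ===== SOURCE B (Python) =====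
-- def is_centered(xs: list[int], n: int) -> bool:
--     # Prefix sums: each centered subarray xs[k:L-k] is checked in O(1).
--     p = [0]
--     for x in xs:
--         p.append(p[-1] + x)
--     L = len(xs)
--     return any(p[L - k] - p[k] == n for k in range(L // 2 + 1))
-- ===== Notes on version B (the rewrite author's own statement) =====
-- stated objective: alternative
-- what changed: Replaces A's two-pointer outward expansion from the center by a prefix-sum array with each centered subarray sum checked via O(1) range subtraction over k = 0..L//2.
import Mathlib
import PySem

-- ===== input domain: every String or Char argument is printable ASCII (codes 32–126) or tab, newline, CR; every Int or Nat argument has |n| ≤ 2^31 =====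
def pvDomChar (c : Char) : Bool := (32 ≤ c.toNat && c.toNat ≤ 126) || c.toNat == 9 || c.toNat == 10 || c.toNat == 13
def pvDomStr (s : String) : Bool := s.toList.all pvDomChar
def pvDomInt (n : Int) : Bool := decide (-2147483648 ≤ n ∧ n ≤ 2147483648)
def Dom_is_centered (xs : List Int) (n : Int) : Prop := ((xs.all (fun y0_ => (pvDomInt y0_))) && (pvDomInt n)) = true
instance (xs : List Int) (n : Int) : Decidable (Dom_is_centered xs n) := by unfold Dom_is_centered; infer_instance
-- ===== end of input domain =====

-- B replaces A's center-outward two-pointer expansion by a prefix-sum array checked with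
-- O(1) range subtraction for each k = 0..L//2 (alternative algorithm, same cost).

-- ===== PORT A =====
-- the while loop of A; indices left/right always stay in range, so pyGetD is exact
def isCenteredLoop (xs : List Int) (n : Int) (cs left right : Int) : Bool :=
  if left ≥ 0 ∧ right < (xs.length : Int) then
    if cs == n && left + 1 == (xs.length : Int) - right then true
    else isCenteredLoop xs n (cs + PySem.List.pyGetD xs left 0 + PySem.List.pyGetD xs right 0)
           (left - 1) (right + 1)
  else cs == n && left + 1 == (xs.length : Int) - right
termination_by (left + 1).toNat
decreasing_by omega

def is_centered (xs : List Int) (n : Int) : Bool :=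
  let length : Int := xs.length
  if length == 0 then n == 0
  else
    let mid := PySem.Int.floordiv length 2
    let center_sum := if PySem.Int.mod length 2 ≠ 0 then PySem.List.pyGetD xs mid 0 else 0
    let left := mid - 1
    let right := mid + (if PySem.Int.mod length 2 ≠ 0 then 1 else 0)
    isCenteredLoop xs n center_sum left right

-- ===== PORT B =====
def is_centered_alt (xs : List Int) (n : Int) : Bool :=
  let p := xs.foldl (fun acc x => acc ++ [PySem.List.pyGetD acc (-1) 0 + x]) [0]
  let L : Int := xs.length
  (PySem.List.pyRange 0 (PySem.Int.floordiv L 2 + 1) 1).any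
    (fun k => PySem.List.pyGetD p (L - k) 0 - PySem.List.pyGetD p k 0 == n)

-- ===== PRECONDITION & SPEC =====
def Spec_is_centered (xs : List Int) (n : Int) (out : Bool) : Prop := out = is_centered_alt xs n
instance (xs : List Int) (n : Int) (out : Bool) : Decidable (Spec_is_centered xs n out) := by unfold Spec_is_centered; infer_instance

-- ===== CLAIM (what is proved, stated in full; the proofs are below) =====
def Claim_equal_is_centered : Prop := ∀ (xs : List Int) (n : Int), Dom_is_centered xs n → Spec_is_centered xs n (is_centered xs n)

-- ===== LEMMAS AND PROOFS =====

-- sum of the centered subarray xs[k : L-k]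
def Tsum (xs : List Int) (k : Nat) : Int :=
  (xs.take (xs.length - k)).sum - (xs.take k).sum

theorem Tsum_step (xs : List Int) (m : Nat) (h : m + 1 ≤ xs.length) :
    Tsum xs (m + 1) + xs.getD m 0 + xs.getD (xs.length - m - 1) 0 = Tsum xs m := by
  unfold Tsum
  have h1 : m < xs.length := h
  obtain ⟨j, hj⟩ : ∃ j, xs.length - m = j + 1 := ⟨xs.length - m - 1, by omega⟩
  have h2 : j < xs.length := by omega
  have e1 : (xs.take (m + 1)).sum = (xs.take m).sum + xs[m] :=
    List.sum_take_succ xs m h1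
  have e2 : (xs.take (xs.length - m)).sum = (xs.take j).sum + xs[j] := by
    rw [hj]; exact List.sum_take_succ xs j h2
  have g1 : xs.getD m 0 = xs[m] := List.getD_eq_getElem xs 0 h1
  have g2 : xs.getD (xs.length - m - 1) 0 = xs[j] := by
    have hj' : xs.length - m - 1 = j := by omega
    rw [hj']; exact List.getD_eq_getElem xs 0 h2
  have hj2 : xs.length - (m + 1) = j := by omega
  rw [hj2, g1, g2, e1, e2]
  ring

theorem loop_eq (xs : List Int) (n : Int) (m : Nat) (hm : m ≤ xs.length) :
    isCenteredLoop xs n (Tsum xs m) ((m : Int) - 1) ((xs.length : Int) - m) =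
      (List.range (m + 1)).any (fun k => Tsum xs k == n) := by
  induction m with
  | zero =>
    rw [isCenteredLoop]
    simp
  | succ m ih =>
    rw [isCenteredLoop]
    push_cast
    have hg : ((m : Int) + 1 - 1 ≥ 0) ∧ ((xs.length : Int) - (m + 1) < (xs.length : Int)) := by
      constructor <;> omega
    rw [if_pos hg]
    by_cases hc : Tsum xs (m + 1) = n
    · simp [hc, List.range_succ]
    · have hcs : (Tsum xs (m + 1) == n) = false := by simp [hc]
      rw [if_neg (by simp [hcs])]
      -- rewrite the recursive-call arguments into the IH's shape
      have hidx1 : PySem.List.pyGetD xs ((m : Int) + 1 - 1) 0 = xs.getD m 0 := by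
        have : ((m : Int) + 1 - 1) = (m : Int) := by ring
        rw [this, PySem.List.pyGetD_natCast]
      have hidx2 : PySem.List.pyGetD xs ((xs.length : Int) - (m + 1)) 0
          = xs.getD (xs.length - m - 1) 0 := by
        have : ((xs.length : Int) - (m + 1)) = ((xs.length - m - 1 : Nat) : Int) := by
          omega
        rw [this, PySem.List.pyGetD_natCast]
      rw [hidx1, hidx2]
      have hL : (xs.length : Int) - (↑m + 1) + 1 = (xs.length : Int) - m := by ring
      have hM : ((m : Int) + 1 - 1 - 1) = (m : Int) - 1 := by ring
      rw [hL, hM, Tsum_step xs m hm]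
      rw [ih (by omega)]
      have : ((List.range (m + 1 + 1)).any fun k => Tsum xs k == n)
          = (((List.range (m + 1)).any fun k => Tsum xs k == n) || (Tsum xs (m+1) == n)) := by
        rw [List.range_succ]; simp
      rw [this, hcs]
      simp

theorem any_congr_mem {α : Type} (l : List α) (p q : α → Bool)
    (h : ∀ x ∈ l, p x = q x) : l.any p = l.any q := by
  induction l with
  | nil => rfl
  | cons a l ih => simp only [List.any_cons, h a (by simp), ih (fun x hx => h x (by simp [hx]))]

-- B-side: the prefix-sum list as a structural scan
def scanAdd (c : Int) : List Int → List Int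
  | [] => [c]
  | x :: xs => c :: scanAdd (c + x) xs

theorem foldl_pref (xs : List Int) (ys : List Int) (c : Int) :
    xs.foldl (fun acc x => acc ++ [PySem.List.pyGetD acc (-1) 0 + x]) (ys ++ [c]) =
      ys ++ scanAdd c xs := by
  induction xs generalizing ys c with
  | nil => simp [scanAdd]
  | cons x xs ih =>
    simp only [List.foldl_cons, scanAdd]
    rw [PySem.List.pyGetD_neg_one_append_singleton]
    rw [ih (ys ++ [c]) (c + x)]
    simp

theorem scanAdd_getD (xs : List Int) (c : Int) (i : Nat) (h : i ≤ xs.length) :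
    (scanAdd c xs).getD i 0 = c + (xs.take i).sum := by
  induction xs generalizing c i with
  | nil =>
    have hi : i = 0 := by simpa using h
    subst hi
    simp [scanAdd]
  | cons x xs ih =>
    cases i with
    | zero => simp [scanAdd]
    | succ i =>
      simp only [scanAdd, List.getD_cons_succ, List.take_succ_cons, List.sum_cons]
      rw [ih (c + x) i (by simpa using h)]
      ring

theorem alt_eq_any (xs : List Int) (n : Int) :
    is_centered_alt xs n =
      (List.range (xs.length / 2 + 1)).any (fun k => Tsum xs k == n) := by
  unfold is_centered_alt
  have hp : xs.foldl (fun acc x => acc ++ [PySem.List.pyGetD acc (-1) 0 + x]) [0]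
      = scanAdd 0 xs := by
    have := foldl_pref xs [] 0
    simpa using this
  simp only [hp]
  have hfd : PySem.Int.floordiv (xs.length : Int) 2 + 1 = ((xs.length / 2 + 1 : Nat) : Int) := by
    rw [show ((2 : Int)) = ((2 : Nat) : Int) by norm_num, PySem.Int.floordiv_natCast]
    push_cast; ring
  rw [hfd, PySem.List.pyRange_zero_nat]
  rw [List.any_map]
  apply any_congr_mem
  intro k hk
  have hk' : k < xs.length / 2 + 1 := List.mem_range.mp hk
  have hkL : k ≤ xs.length := by omega
  have h1 : PySem.List.pyGetD (scanAdd 0 xs) ((xs.length : Int) - (k : Int)) 0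
      = (scanAdd 0 xs).getD (xs.length - k) 0 := by
    have : ((xs.length : Int) - (k : Int)) = ((xs.length - k : Nat) : Int) := by omega
    rw [this, PySem.List.pyGetD_natCast]
  have h2 : PySem.List.pyGetD (scanAdd 0 xs) ((k : Nat) : Int) 0
      = (scanAdd 0 xs).getD k 0 := PySem.List.pyGetD_natCast _ _ _
  simp only [Function.comp]
  rw [h1, h2, scanAdd_getD xs 0 (xs.length - k) (by omega), scanAdd_getD xs 0 k hkL]
  unfold Tsum
  norm_num

-- ===== VERDICT (by name: the statement is the Claim_ definition above) =====
theorem is_centered_spec : Claim_equal_is_centered := by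
  intro xs n _
  unfold Spec_is_centered
  rw [alt_eq_any]
  unfold is_centered
  by_cases h0 : xs.length = 0
  · rw [if_pos (by simp [h0])]
    simp [h0, Tsum, eq_comm]
  · rw [if_neg (by simp [h0])]
    have hfd : PySem.Int.floordiv (xs.length : Int) 2 = ((xs.length / 2 : Nat) : Int) := by
      rw [show ((2 : Int)) = ((2 : Nat) : Int) by norm_num, PySem.Int.floordiv_natCast]
    have hmod : PySem.Int.mod (xs.length : Int) 2 = ((xs.length % 2 : Nat) : Int) := by
      rw [show ((2 : Int)) = ((2 : Nat) : Int) by norm_num, PySem.Int.mod_natCast]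
    set L := xs.length with hL
    by_cases hpar : L % 2 = 0
    · -- even length: empty center, right = mid
      simp only [hfd, hmod, hpar, Nat.cast_zero]
      rw [if_neg (by simp), if_neg (by simp)]
      have hmid : L - L / 2 = L / 2 := by omega
      have e1 : (0 : Int) = Tsum xs (L / 2) := by unfold Tsum; rw [← hL, hmid]; ring
      have e2 : ((L / 2 : Nat) : Int) + 0 = (L : Int) - ((L / 2 : Nat) : Int) := by omega
      rw [e2, e1]
      exact loop_eq xs n (L / 2) (by omega)
    · -- odd length: center element, right = mid + 1
      simp only [hfd, hmod]
      have hne : (((L % 2 : Nat) : Int) ≠ 0) := by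
        push_cast
        omega
      rw [if_pos hne, if_pos hne]
      have hmlt : L / 2 < L := by omega
      have e1 : PySem.List.pyGetD xs ((L / 2 : Nat) : Int) 0 = Tsum xs (L / 2) := by
        rw [PySem.List.pyGetD_natCast]
        unfold Tsum
        rw [← hL]
        have : L - L / 2 = L / 2 + 1 := by omega
        rw [this, List.sum_take_succ xs (L / 2) hmlt,
          List.getD_eq_getElem xs 0 hmlt]
        ring
      have e2 : ((L / 2 : Nat) : Int) + 1 = (L : Int) - ((L / 2 : Nat) : Int) := by omega
      rw [e1, e2]
      exact loop_eq xs n (L / 2) (by omega)
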